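-- pv_equiv track=rewrite | github.com/intelligenceafa-cloud/Auto-Prov | MAGIC/eval_atlas.py | aggregate_node_scores_to_logs
-- ===== SOURCE A (Python) =====
-- from collections import defaultdict
--
-- def aggregate_node_scores_to_logs(node_scores, node_indices, edge_to_log_mapping, graph_edges):
--     log_scores = defaultdict(list)
--
--     node_to_edges = defaultdict(list)
--     for edge_idx, (src, dst) in enumerate(graph_edges):
--         node_to_edges[src].append(edge_idx)
--         node_to_edges[dst].append(edge_idx)
--
--     for node_idx, score in node_scores.items():
--         if node_idx in node_to_edges:
--             for edge_idx in node_to_edges[node_idx]: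
--                 if edge_idx in edge_to_log_mapping:
--                     log_key = edge_to_log_mapping[edge_idx]
--                     log_scores[log_key].append(score)
--
--     log_scores_final = {}
--     log_node_counts = {}
--     extracted_logs = set()
--
--     for log_key, scores in log_scores.items():
--         log_node_counts[log_key] = len(scores)
--         log_scores_final[log_key] = max(scores)
--         extracted_logs.add(log_key)
--
--     return log_scores_final, log_node_counts, extracted_logs
-- ===== SOURCE B (Python) =====
-- def aggregate_node_scores_to_logs(node_scores, node_indices, edge_to_log_mapping, graph_edges):
--     # One nested pass: no node_to_edges index; then dict comprehensions instead of a finish loop.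
--     log_scores = {}
--     for node_idx, score in node_scores.items():
--         for edge_idx, (src, dst) in enumerate(graph_edges):
--             if edge_idx in edge_to_log_mapping:
--                 log_key = edge_to_log_mapping[edge_idx]
--                 for endpoint in (src, dst):
--                     if endpoint == node_idx:
--                         log_scores.setdefault(log_key, []).append(score)
--     log_scores_final = {k: max(v) for k, v in log_scores.items()}
--     log_node_counts = {k: len(v) for k, v in log_scores.items()}
--     extracted_logs = set(log_scores)
--     return log_scores_final, log_node_counts, extracted_logs
-- ===== Notes on version B (the rewrite author's own statement) =====
-- stated objective: simpler
-- what changed: B drops the node_to_edges index and scans the edge list directly per node (same append order, self-loops counted twice), and replaces the final accumulation loop with dict comprehensions over the grouped scores.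
import Mathlib
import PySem

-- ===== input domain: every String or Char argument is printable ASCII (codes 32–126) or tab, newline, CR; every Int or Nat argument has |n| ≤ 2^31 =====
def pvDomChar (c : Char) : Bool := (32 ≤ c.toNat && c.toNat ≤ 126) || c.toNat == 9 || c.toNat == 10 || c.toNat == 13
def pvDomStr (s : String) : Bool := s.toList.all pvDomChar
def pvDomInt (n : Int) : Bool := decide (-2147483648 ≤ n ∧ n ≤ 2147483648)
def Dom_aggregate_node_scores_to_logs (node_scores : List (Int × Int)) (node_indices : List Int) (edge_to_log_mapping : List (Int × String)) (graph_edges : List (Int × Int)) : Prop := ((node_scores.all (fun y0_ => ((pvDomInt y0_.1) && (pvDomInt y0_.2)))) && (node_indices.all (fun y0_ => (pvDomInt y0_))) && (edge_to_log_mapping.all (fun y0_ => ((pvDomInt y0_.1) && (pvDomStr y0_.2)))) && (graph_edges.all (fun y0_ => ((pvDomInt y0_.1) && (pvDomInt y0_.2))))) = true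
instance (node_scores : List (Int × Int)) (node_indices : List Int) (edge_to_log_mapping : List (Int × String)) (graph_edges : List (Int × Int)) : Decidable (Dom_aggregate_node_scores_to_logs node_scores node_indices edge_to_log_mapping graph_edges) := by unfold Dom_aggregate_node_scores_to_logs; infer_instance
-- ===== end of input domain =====

-- B drops A's node_to_edges index (it scans the edge list directly once per node, keeping A's
-- append order, self-loops counted twice) and replaces A's final accumulation loop by dict
-- comprehensions; objective: simpler decomposition, not speed.

-- ===== PORT A =====
-- edge_to_log_mapping is a Python dict: lookup = first match in the association list.
-- A's 'if edge_idx in edge_to_log_mapping: log_key = edge_to_log_mapping[edge_idx]' is the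
-- some-branch of get? (membership succeeds exactly when get? is some).
def aggEmGet (edge_to_log_mapping : List (Int × String)) (e : Int) : Option String :=
  (PySem.Dict.mk edge_to_log_mapping).get? e

def aggregate_node_scores_to_logs (node_scores : List (Int × Int)) (node_indices : List Int) (edge_to_log_mapping : List (Int × String)) (graph_edges : List (Int × Int)) : (List (String × Int)) × (List (String × Int)) × List String :=
  -- node_to_edges = defaultdict(list); for edge_idx,(src,dst) in enumerate(graph_edges): append edge_idx to both endpoints
  let node_to_edges : PySem.Dict Int (List Int) :=
    (PySem.List.enumerate graph_edges).foldl
      (fun d p => (d.modify p.2.1 [] (· ++ [p.1])).modify p.2.2 [] (· ++ [p.1]))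
      PySem.Dict.empty
  -- for node_idx, score in node_scores.items(): if node_idx in node_to_edges: …
  let log_scores : PySem.Dict String (List Int) :=
    node_scores.foldl
      (fun ls ns =>
        match node_to_edges.get? ns.1 with
        | none => ls
        | some es =>
            es.foldl
              (fun ls e =>
                match aggEmGet edge_to_log_mapping e with
                | none => ls
                | some k => ls.modify k [] (· ++ [ns.2]))   -- log_scores[log_key].append(score)
              ls)
      PySem.Dict.empty
  -- final loop: counts, max (scores is never empty here, so max never raises; getD 0 is unreachable), set
  let t :=
    log_scores.items.foldl
      (fun acc kv =>
        (acc.1.insert kv.1 ((PySem.List.max? kv.2 (fun x => x)).getD 0),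
         acc.2.1.insert kv.1 (Int.ofNat kv.2.length),
         PySem.Set.add acc.2.2 kv.1))
      (PySem.Dict.empty, PySem.Dict.empty, PySem.Set.empty)
  (t.1.items, t.2.1.items, t.2.2)

-- ===== PORT B =====
def aggregate_node_scores_to_logs_alt (node_scores : List (Int × Int)) (node_indices : List Int) (edge_to_log_mapping : List (Int × String)) (graph_edges : List (Int × Int)) : (List (String × Int)) × (List (String × Int)) × List String :=
  -- single nested pass: per node, scan enumerate(graph_edges) directly
  let log_scores : PySem.Dict String (List Int) :=
    node_scores.foldl
      (fun ls ns =>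
        (PySem.List.enumerate graph_edges).foldl
          (fun ls q =>
            match aggEmGet edge_to_log_mapping q.1 with
            | none => ls
            | some k =>
                [q.2.1, q.2.2].foldl    -- for endpoint in (src, dst)
                  (fun ls ep =>
                    if ep = ns.1 then ls.modify k [] (· ++ [ns.2])   -- setdefault(k, []).append(score)
                    else ls)
                  ls)
          ls)
      PySem.Dict.empty
  -- dict comprehensions over log_scores.items(); values are never empty so max never raises (getD 0 unreachable)
  ((PySem.Dict.ofList (log_scores.items.map (fun kv => (kv.1, (PySem.List.max? kv.2 (fun x => x)).getD 0)))).items,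
   (PySem.Dict.ofList (log_scores.items.map (fun kv => (kv.1, Int.ofNat kv.2.length)))).items,
   PySem.Set.ofList log_scores.keys)

-- ===== PRECONDITION & SPEC =====
def Spec_aggregate_node_scores_to_logs (node_scores : List (Int × Int)) (node_indices : List Int) (edge_to_log_mapping : List (Int × String)) (graph_edges : List (Int × Int)) (out : (List (String × Int)) × (List (String × Int)) × List String) : Prop := out = aggregate_node_scores_to_logs_alt node_scores node_indices edge_to_log_mapping graph_edges
instance (node_scores : List (Int × Int)) (node_indices : List Int) (edge_to_log_mapping : List (Int × String)) (graph_edges : List (Int × Int)) (out : (List (String × Int)) × (List (String × Int)) × List String) : Decidable (Spec_aggregate_node_scores_to_logs node_scores node_indices edge_to_log_mapping graph_edges out) := by unfold Spec_aggregate_node_scores_to_logs; infer_instance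

-- ===== CLAIM (what is proved, stated in full; the proofs are below) =====
def Claim_equal_aggregate_node_scores_to_logs : Prop := ∀ (node_scores : List (Int × Int)) (node_indices : List Int) (edge_to_log_mapping : List (Int × String)) (graph_edges : List (Int × Int)), Dom_aggregate_node_scores_to_logs node_scores node_indices edge_to_log_mapping graph_edges → Spec_aggregate_node_scores_to_logs node_scores node_indices edge_to_log_mapping graph_edges (aggregate_node_scores_to_logs node_scores node_indices edge_to_log_mapping graph_edges)

-- ===== LEMMAS AND PROOFS =====

-- the per-edge-occurrence step both programs perform on log_scores
def aggStep (edge_to_log_mapping : List (Int × String)) (score : Int)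
    (ls : PySem.Dict String (List Int)) (e : Int) : PySem.Dict String (List Int) :=
  match aggEmGet edge_to_log_mapping e with
  | none => ls
  | some k => ls.modify k [] (· ++ [score])

-- the sequence of edge indices incident to n, in A's node_to_edges order (self-loops twice)
def aggIncident (graph_edges : List (Int × Int)) (n : Int) : List Int :=
  (PySem.List.enumerate graph_edges).flatMap
    (fun q => (if q.2.1 = n then [q.1] else []) ++ (if q.2.2 = n then [q.1] else []))

-- a foldl whose every step is itself a foldl over f a is a foldl over the flatMap
theorem aggFoldlGlue {α β σ : Type} (g : σ → α → σ) (f : α → List β) (st : σ → β → σ)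
    (h : ∀ s a, g s a = (f a).foldl st s) :
    ∀ (l : List α) (s : σ), l.foldl g s = (l.flatMap f).foldl st s := by
  intro l
  induction l with
  | nil => intro s; simp
  | cons x xs ih => intro s; simp only [List.foldl_cons, List.flatMap_cons, List.foldl_append, h, ih]

theorem aggN2E_getD (graph_edges : List (Int × Int)) (n : Int) :
    ((PySem.List.enumerate graph_edges).foldl
      (fun d p => (d.modify p.2.1 [] (· ++ [p.1])).modify p.2.2 [] (· ++ [p.1]))
      PySem.Dict.empty).getD n []
    = aggIncident graph_edges n := by
  rw [aggFoldlGlue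
        (fun (d : PySem.Dict Int (List Int)) (p : Int × (Int × Int)) =>
          (d.modify p.2.1 [] (· ++ [p.1])).modify p.2.2 [] (· ++ [p.1]))
        (fun p => [(p.2.1, p.1), (p.2.2, p.1)])
        (fun d r => d.modify r.1 [] (· ++ [r.2])) (fun _ _ => rfl)]
  rw [PySem.Dict.getD_foldl_modify_append]
  simp only [PySem.Dict.getD_empty, List.nil_append, List.filter_flatMap, List.map_flatMap,
    aggIncident]
  refine List.flatMap_congr fun q _ => ?_
  by_cases h1 : q.2.1 = n <;> by_cases h2 : q.2.2 = n <;>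
    simp [h1, h2]

-- B's per-node inner loop is the fold of aggStep over the incident sequence
theorem aggInnerB (edge_to_log_mapping : List (Int × String)) (graph_edges : List (Int × Int))
    (n score : Int) (ls : PySem.Dict String (List Int)) :
    (PySem.List.enumerate graph_edges).foldl
      (fun ls q =>
        match aggEmGet edge_to_log_mapping q.1 with
        | none => ls
        | some k => [q.2.1, q.2.2].foldl
            (fun ls ep => if ep = n then ls.modify k [] (· ++ [score]) else ls) ls)
      ls
    = (aggIncident graph_edges n).foldl (aggStep edge_to_log_mapping score) ls := by
  have hper : ∀ (s : PySem.Dict String (List Int)) (q : Int × (Int × Int)),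
      (match aggEmGet edge_to_log_mapping q.1 with
       | none => s
       | some k => [q.2.1, q.2.2].foldl
           (fun ls ep => if ep = n then ls.modify k [] (· ++ [score]) else ls) s)
      = ((if q.2.1 = n then [q.1] else []) ++ (if q.2.2 = n then [q.1] else [])).foldl
          (aggStep edge_to_log_mapping score) s := by
    intro s q
    rcases h : aggEmGet edge_to_log_mapping q.1 with _ | k <;>
      by_cases h1 : q.2.1 = n <;> by_cases h2 : q.2.2 = n <;>
        simp [List.foldl, aggStep, h, h1, h2]
  rw [aggFoldlGlue _ _ _ hper]
  rfl

-- A's per-node inner loop agrees with B's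
theorem aggInnerA (edge_to_log_mapping : List (Int × String)) (graph_edges : List (Int × Int))
    (n score : Int) (ls : PySem.Dict String (List Int)) :
    (match ((PySem.List.enumerate graph_edges).foldl
        (fun d p => (d.modify p.2.1 [] (· ++ [p.1])).modify p.2.2 [] (· ++ [p.1]))
        PySem.Dict.empty).get? n with
     | none => ls
     | some es => es.foldl
         (fun ls e =>
           match aggEmGet edge_to_log_mapping e with
           | none => ls
           | some k => ls.modify k [] (· ++ [score])) ls)
    = (aggIncident graph_edges n).foldl (aggStep edge_to_log_mapping score) ls := by
  rcases h : ((PySem.List.enumerate graph_edges).foldl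
      (fun d p => (d.modify p.2.1 [] (· ++ [p.1])).modify p.2.2 [] (· ++ [p.1]))
      PySem.Dict.empty).get? n with _ | es
  · have hg : aggIncident graph_edges n = [] := by
      rw [← aggN2E_getD graph_edges n, PySem.Dict.getD_eq_get?_getD, h]
      rfl
    rw [h, hg]
    rfl
  · have hg : es = aggIncident graph_edges n := by
      rw [← aggN2E_getD graph_edges n, PySem.Dict.getD_eq_get?_getD, h]
      rfl
    rw [h, hg]
    rfl

-- both programs build the SAME log_scores dict
theorem aggLS_eq (node_scores : List (Int × Int)) (edge_to_log_mapping : List (Int × String))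
    (graph_edges : List (Int × Int)) :
    (node_scores.foldl
      (fun ls ns =>
        match ((PySem.List.enumerate graph_edges).foldl
            (fun d p => (d.modify p.2.1 [] (· ++ [p.1])).modify p.2.2 [] (· ++ [p.1]))
            PySem.Dict.empty).get? ns.1 with
        | none => ls
        | some es => es.foldl
            (fun ls e =>
              match aggEmGet edge_to_log_mapping e with
              | none => ls
              | some k => ls.modify k [] (· ++ [ns.2])) ls)
      PySem.Dict.empty)
    = (node_scores.foldl
        (fun ls ns =>
          (PySem.List.enumerate graph_edges).foldl
            (fun ls q =>
              match aggEmGet edge_to_log_mapping q.1 with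
              | none => ls
              | some k => [q.2.1, q.2.2].foldl
                  (fun ls ep => if ep = ns.1 then ls.modify k [] (· ++ [ns.2]) else ls) ls)
            ls)
        PySem.Dict.empty) := by
  have hf : (fun (ls : PySem.Dict String (List Int)) (ns : Int × Int) =>
      match ((PySem.List.enumerate graph_edges).foldl
          (fun d p => (d.modify p.2.1 [] (· ++ [p.1])).modify p.2.2 [] (· ++ [p.1]))
          PySem.Dict.empty).get? ns.1 with
      | none => ls
      | some es => es.foldl
          (fun ls e =>
            match aggEmGet edge_to_log_mapping e with
            | none => ls
            | some k => ls.modify k [] (· ++ [ns.2])) ls)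
      = (fun ls ns =>
      (PySem.List.enumerate graph_edges).foldl
        (fun ls q =>
          match aggEmGet edge_to_log_mapping q.1 with
          | none => ls
          | some k => [q.2.1, q.2.2].foldl
              (fun ls ep => if ep = ns.1 then ls.modify k [] (· ++ [ns.2]) else ls) ls)
        ls) := by
    funext ls ns
    rw [aggInnerA, aggInnerB]
  rw [hf]

-- a property preserved by every step is preserved by the fold
theorem aggFoldlPreserve {σ α : Type} (P : σ → Prop) (g : σ → α → σ)
    (h : ∀ s a, P s → P (g s a)) : ∀ (l : List α) (s : σ), P s → P (l.foldl g s) := by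
  intro l
  induction l with
  | nil => intro s hs; simpa using hs
  | cons x xs ih => intro s hs; exact ih _ (h s x hs)

theorem aggStep_nodup (edge_to_log_mapping : List (Int × String)) (score : Int)
    (ls : PySem.Dict String (List Int)) (e : Int) (h : ls.keys.Nodup) :
    (aggStep edge_to_log_mapping score ls e).keys.Nodup := by
  unfold aggStep
  rcases aggEmGet edge_to_log_mapping e with _ | k
  · exact h
  · rw [PySem.Dict.keys_modify]
    rcases hc : ls.contains k with _ | _
    · rw [PySem.Dict.keys_insert_of_not_contains _ _ hc]
      have : k ∉ ls.keys := fun hm => by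
        rw [(PySem.Dict.contains_iff_mem_keys ls k).mpr hm] at hc; cases hc
      rw [List.nodup_append]
      refine ⟨h, List.nodup_singleton k, ?_⟩
      intro a ha b hb hab
      apply this
      rw [← List.mem_singleton.mp hb, ← hab]
      exact ha
    · rw [PySem.Dict.keys_insert_of_contains _ _ hc]
      exact h

-- log_scores has Nodup keys
theorem aggLS_nodup (node_scores : List (Int × Int)) (edge_to_log_mapping : List (Int × String))
    (graph_edges : List (Int × Int)) :
    ((node_scores.foldl
        (fun ls ns =>
          (PySem.List.enumerate graph_edges).foldl
            (fun ls q =>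
              match aggEmGet edge_to_log_mapping q.1 with
              | none => ls
              | some k => [q.2.1, q.2.2].foldl
                  (fun ls ep => if ep = ns.1 then ls.modify k [] (· ++ [ns.2]) else ls) ls)
            ls)
        PySem.Dict.empty : PySem.Dict String (List Int)).keys).Nodup := by
  apply aggFoldlPreserve (fun (d : PySem.Dict String (List Int)) => d.keys.Nodup)
  · intro s ns hs
    rw [aggInnerB]
    apply aggFoldlPreserve (fun (d : PySem.Dict String (List Int)) => d.keys.Nodup)
    · intro s e hs
      exact aggStep_nodup _ _ _ _ hs
    · exact hs
  · exact PySem.Dict.nodup_keys_empty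

-- splitting A's simultaneous triple fold into its three components
theorem aggTripleSplit (l : List (String × List Int)) (d1 d2 : PySem.Dict String Int)
    (st : PySem.Set String) :
    l.foldl
      (fun acc kv =>
        (acc.1.insert kv.1 ((PySem.List.max? kv.2 (fun x => x)).getD 0),
         acc.2.1.insert kv.1 (Int.ofNat kv.2.length),
         PySem.Set.add acc.2.2 kv.1))
      (d1, d2, st)
    = (l.foldl (fun d kv => d.insert kv.1 ((PySem.List.max? kv.2 (fun x => x)).getD 0)) d1,
       l.foldl (fun d kv => d.insert kv.1 (Int.ofNat kv.2.length)) d2,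
       l.foldl (fun s kv => PySem.Set.add s kv.1) st) := by
  have h2 := PySem.List.foldl_prod_mk
    (fun (d : PySem.Dict String Int) (kv : String × List Int) => d.insert kv.1 (Int.ofNat kv.2.length))
    (fun (s : PySem.Set String) (kv : String × List Int) => PySem.Set.add s kv.1) l d2 st
  have h1 := PySem.List.foldl_prod_mk
    (fun (d : PySem.Dict String Int) (kv : String × List Int) =>
      d.insert kv.1 ((PySem.List.max? kv.2 (fun x => x)).getD 0))
    (fun (p : PySem.Dict String Int × PySem.Set String) (kv : String × List Int) =>
      ((fun (d : PySem.Dict String Int) (kv : String × List Int) => d.insert kv.1 (Int.ofNat kv.2.length)) p.1 kv,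
       (fun (s : PySem.Set String) (kv : String × List Int) => PySem.Set.add s kv.1) p.2 kv))
    l d1 (d2, st)
  exact h1.trans (congrArg (Prod.mk (l.foldl
    (fun d kv => d.insert kv.1 ((PySem.List.max? kv.2 (fun x => x)).getD 0)) d1)) h2)

-- ===== VERDICT (by name: the statement is the Claim_ definition above) =====
theorem aggregate_node_scores_to_logs_spec : Claim_equal_aggregate_node_scores_to_logs := by
  intro node_scores node_indices edge_to_log_mapping graph_edges _
  unfold Spec_aggregate_node_scores_to_logs
  simp only [aggregate_node_scores_to_logs, aggregate_node_scores_to_logs_alt]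
  rw [aggLS_eq]
  set LS := (node_scores.foldl
        (fun ls ns =>
          (PySem.List.enumerate graph_edges).foldl
            (fun ls q =>
              match aggEmGet edge_to_log_mapping q.1 with
              | none => ls
              | some k => [q.2.1, q.2.2].foldl
                  (fun ls ep => if ep = ns.1 then ls.modify k [] (· ++ [ns.2]) else ls) ls)
            ls)
        PySem.Dict.empty : PySem.Dict String (List Int)) with hLS
  have hnd : LS.keys.Nodup := by rw [hLS]; exact aggLS_nodup _ _ _
  have hndk : (LS.items.map (fun kv => kv.1)).Nodup := hnd
  -- split the triple fold
  rw [aggTripleSplit]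
  -- component 1: max dict
  rw [PySem.Dict.items_foldl_insert_fresh LS.items (fun kv => kv.1)
        (fun kv => (PySem.List.max? kv.2 (fun x => x)).getD 0) PySem.Dict.empty
        (fun a _ => PySem.Dict.contains_empty a.1) hndk]
  -- component 2: count dict
  rw [PySem.Dict.items_foldl_insert_fresh LS.items (fun kv => kv.1)
        (fun kv => Int.ofNat kv.2.length) PySem.Dict.empty
        (fun a _ => PySem.Dict.contains_empty a.1) hndk]
  -- B's comprehensions: Dict.ofList over fresh distinct keys keeps the list
  have hofList : ∀ (v : String × List Int → Int),
      (PySem.Dict.ofList (LS.items.map (fun kv => (kv.1, v kv)))).items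
        = LS.items.map (fun kv => (kv.1, v kv)) := by
    intro v
    show ((LS.items.map (fun kv => (kv.1, v kv))).foldl
        (fun acc p => acc.insert p.1 p.2) PySem.Dict.empty).items = _
    rw [PySem.Dict.items_foldl_insert_fresh (LS.items.map (fun kv => (kv.1, v kv)))
          (fun p => p.1) (fun p => p.2) PySem.Dict.empty
          (fun a _ => PySem.Dict.contains_empty a.1)
          (by simpa [List.map_map, Function.comp] using hndk)]
    simp [Function.comp_def, PySem.Dict.empty]
  rw [hofList, hofList]
  -- set component: fold of add over the key projection is Set.ofList keys
  simp only [Prod.mk.injEq]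
  refine ⟨rfl, rfl, ?_⟩
  show LS.items.foldl (fun s kv => PySem.Set.add s kv.1) PySem.Set.empty = _
  rw [PySem.Set.ofList_eq_foldl]
  show _ = List.foldl PySem.Set.add PySem.Set.empty (LS.items.map (fun kv => kv.1))
  rw [List.foldl_map]
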